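-- pv_equiv track=rewrite | github.com/lenovo/openlico | core/apps/oneapi/lico/core/oneapi/utils/intel_openmp.py | change_arr
-- ===== SOURCE A (Python) =====
-- def change_arr(arr_dim2):
--     tid_bind = dict()
--     for tid1, proc1 in enumerate(arr_dim2):
--         tid_key = str(tid1)
--         for tid2, proc2 in enumerate(arr_dim2):
--             if proc1 == proc2:
--                 if tid2 > tid1:
--                     tid_key = tid_key + ',' + str(tid2)
--                 elif tid2 == tid1:
--                     continue
--                 else:
--                     break
--         else:
--             tid_bind[tid_key] = ','.join([str(p) for p in proc1])
--     return tid_bind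
-- ===== SOURCE B (Python) =====
-- def change_arr(arr_dim2):
--     groups = {}
--     for tid, proc in enumerate(arr_dim2):
--         groups.setdefault(tuple(proc), []).append(tid)
--     return {
--         ','.join(str(t) for t in tids): ','.join(str(p) for p in proc)
--         for proc, tids in groups.items()
--     }
-- ===== Notes on version B (the rewrite author's own statement) =====
-- stated objective: idiomatic
-- what changed: A rescans the whole array for every thread id (nested enumerate loops with for/else-break) to decide first occurrence and collect equal-proc tids; B makes one grouping pass keyed by tuple(proc) into a dict and then emits each group's joined tids/procs.
import Mathlib
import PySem

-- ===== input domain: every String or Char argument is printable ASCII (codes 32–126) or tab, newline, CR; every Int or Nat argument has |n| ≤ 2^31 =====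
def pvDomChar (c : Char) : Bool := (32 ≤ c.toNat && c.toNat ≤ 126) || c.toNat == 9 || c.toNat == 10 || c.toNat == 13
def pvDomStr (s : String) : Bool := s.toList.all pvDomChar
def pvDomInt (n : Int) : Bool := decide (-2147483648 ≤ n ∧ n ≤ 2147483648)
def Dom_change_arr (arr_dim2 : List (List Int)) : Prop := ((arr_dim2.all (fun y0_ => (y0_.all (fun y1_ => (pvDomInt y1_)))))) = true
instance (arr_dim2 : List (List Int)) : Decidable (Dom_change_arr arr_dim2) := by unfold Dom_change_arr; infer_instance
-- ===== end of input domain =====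

-- B replaces A's nested rescan-per-thread-id (for/else with break) by a single
-- dict-grouping pass keyed by the processor list (objective: idiomatic).

-- ===== PORT A =====
-- inner 'for tid2, proc2 in enumerate(arr_dim2)' loop; none = the loop hit 'break'
def changeArrInner (tid1 : Int) (proc1 : List Int) : String → List (Int × List Int) → Option String
  | key, [] => some key
  | key, (tid2, proc2) :: rest =>
    if proc1 = proc2 then
      if tid2 > tid1 then changeArrInner tid1 proc1 (key ++ "," ++ PySem.Int.toStr tid2) rest
      else if tid2 = tid1 then changeArrInner tid1 proc1 key rest
      else none
    else changeArrInner tid1 proc1 key rest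

-- body of the outer 'for tid1, proc1 in enumerate(arr_dim2)' loop
def changeArrStep (arr_dim2 : List (List Int)) (tid_bind : PySem.Dict String String)
    (q : Int × List Int) : PySem.Dict String String :=
  match changeArrInner q.1 q.2 (PySem.Int.toStr q.1) (PySem.List.enumerate arr_dim2 0) with
  | some tid_key => tid_bind.insert tid_key
      (PySem.Str.join "," (q.2.map (fun p => PySem.Int.toStr p)))
  | none => tid_bind

def change_arr (arr_dim2 : List (List Int)) : List (String × String) :=
  ((PySem.List.enumerate arr_dim2 0).foldl (changeArrStep arr_dim2) PySem.Dict.empty).items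

-- ===== PORT B =====
def change_arr_alt (arr_dim2 : List (List Int)) : List (String × String) :=
  let groups : PySem.Dict (List Int) (List Int) :=
    (PySem.List.enumerate arr_dim2 0).foldl
      (fun d q => d.modify q.2 [] (fun ts => ts ++ [q.1])) PySem.Dict.empty
  (groups.items.foldl
    (fun (out : PySem.Dict String String) g =>
      out.insert (PySem.Str.join "," (g.2.map (fun t => PySem.Int.toStr t)))
                 (PySem.Str.join "," (g.1.map (fun p => PySem.Int.toStr p))))
    PySem.Dict.empty).items

-- ===== PRECONDITION & SPEC =====
def Spec_change_arr (arr_dim2 : List (List Int)) (out : List (String × String)) : Prop := out = change_arr_alt arr_dim2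
instance (arr_dim2 : List (List Int)) (out : List (String × String)) : Decidable (Spec_change_arr arr_dim2 out) := by unfold Spec_change_arr; infer_instance

-- ===== CLAIM (what is proved, stated in full; the proofs are below) =====
def Claim_equal_change_arr : Prop := ∀ (arr_dim2 : List (List Int)), Dom_change_arr arr_dim2 → Spec_change_arr arr_dim2 (change_arr arr_dim2)

-- ===== LEMMAS AND PROOFS =====

-- the (key, value) pair emitted for a group (proc, tids)
def pvG (pr : List Int × List Int) : String × String :=
  (PySem.Str.join "," (pr.2.map (fun t => PySem.Int.toStr t)),
   PySem.Str.join "," (pr.1.map (fun p => PySem.Int.toStr p)))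

-- tids (first components) of the entries of L whose proc (second component) equals p
def pvF (p : List Int) (L : List (Int × List Int)) : List Int :=
  (L.filter (fun q => q.2 = p)).map (·.1)

-- canonical grouping of an enumerated list: (proc, its tids) in first-occurrence order
def pvCanon : List (Int × List Int) → List (List Int × List Int)
  | [] => []
  | (t, p) :: L => (p, t :: pvF p L) :: pvCanon (L.filter (fun q => ¬ (q.2 = p)))
  termination_by L => L.length
  decreasing_by
    simp only [List.length_unattach]
    exact Nat.lt_succ_of_le (le_trans (List.length_filter_le _ _) (by simp))

theorem pvF_cons (p : List Int) (t : Int) (r : List Int) (L : List (Int × List Int)) :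
    pvF p ((t, r) :: L) = if r = p then t :: pvF p L else pvF p L := by
  by_cases h : r = p <;> simp [pvF, h]

theorem pvF_filter (q : List Int) (c : Int × List Int → Bool) (L : List (Int × List Int))
    (h : ∀ r : Int × List Int, r.2 = q → c r = true) :
    pvF q (L.filter c) = pvF q L := by
  simp only [pvF, List.filter_filter]
  congr 1
  apply List.filter_congr
  intro x _
  by_cases hq : x.2 = q
  · simp [hq, h x hq]
  · simp [hq]

theorem pvF_filter_ne (q p : List Int) (L : List (Int × List Int)) (h : q ≠ p) :
    pvF q (L.filter (fun r => ¬ (r.2 = p))) = pvF q L := by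
  apply pvF_filter
  intro r hr
  simp [hr, h]

-- gluing the separator into the first part is absorbed by join
theorem pvJoin_glue (a b : String) (rest : List String) :
    PySem.Str.join "," ((a ++ "," ++ b) :: rest) = PySem.Str.join "," (a :: b :: rest) := by
  rw [← String.toList_inj]
  cases rest with
  | nil =>
    simp [PySem.Str.toList_join, PySem.Chars.join_singleton, PySem.Chars.join_cons_cons]
  | cons r rest =>
    simp [PySem.Str.toList_join, PySem.Chars.join_cons_cons]

-- the string key A builds incrementally equals B's ','.join
theorem pvKey_fold (ts : List Int) (s : String) :
    List.foldl (fun k x => k ++ "," ++ PySem.Int.toStr x) s ts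
      = PySem.Str.join "," (s :: ts.map (fun t => PySem.Int.toStr t)) := by
  induction ts generalizing s with
  | nil =>
    rw [← String.toList_inj]
    simp [PySem.Str.toList_join, PySem.Chars.join_singleton]
  | cons x ts ih =>
    simp only [List.foldl_cons, List.map_cons]
    rw [ih, pvJoin_glue]

-- inner loop, completion case: appends every strictly later tid of the same proc
theorem pvInner_some (L : List (Int × List Int)) (t : Int) (p : List Int) (key : String)
    (h : ∀ x ∈ pvF p L, t ≤ x) :
    changeArrInner t p key L
      = some (List.foldl (fun k x => k ++ "," ++ PySem.Int.toStr x) key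
          ((pvF p L).filter (fun x => t < x))) := by
  induction L generalizing key with
  | nil => simp [changeArrInner, pvF]
  | cons a L ih =>
    obtain ⟨t2, p2⟩ := a
    rw [pvF_cons] at h ⊢
    by_cases hp : p2 = p
    · simp only [hp] at h ⊢
      have ht2 : t ≤ t2 := h t2 (by simp)
      by_cases hgt : t2 > t
      · rw [show changeArrInner t p key ((t2, p) :: L)
              = changeArrInner t p (key ++ "," ++ PySem.Int.toStr t2) L by
            simp [changeArrInner, hgt]]
        rw [ih _ (fun x hx => h x (by simp [hx]))]
        simp [hgt]
      · have heq : t2 = t := le_antisymm (by omega) ht2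
        rw [show changeArrInner t p key ((t2, p) :: L) = changeArrInner t p key L by
            simp [changeArrInner, heq]]
        rw [ih _ (fun x hx => h x (by simp [hx]))]
        simp [heq]
    · simp only [hp] at h ⊢
      rw [show changeArrInner t p key ((t2, p2) :: L) = changeArrInner t p key L by
            simp only [changeArrInner]
            rw [if_neg (fun hh => hp (Eq.symm hh))]]
      exact ih _ h

-- inner loop, break case: some earlier tid has the same proc
theorem pvInner_none (L : List (Int × List Int)) (t : Int) (p : List Int) (key : String)
    (h : ∃ x ∈ pvF p L, x < t) :
    changeArrInner t p key L = none := by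
  induction L generalizing key with
  | nil => simp [pvF] at h
  | cons a L ih =>
    obtain ⟨t2, p2⟩ := a
    rw [pvF_cons] at h
    by_cases hp : p2 = p
    · subst hp
      simp only [reduceIte] at h
      obtain ⟨x, hx, hxt⟩ := h
      rcases List.mem_cons.mp hx with hx | hx
      · subst hx
        simp [changeArrInner, show ¬ x > t by omega, show ¬ x = t by omega]
      · by_cases hgt : t2 > t
        · rw [show changeArrInner t p2 key ((t2, p2) :: L)
                = changeArrInner t p2 (key ++ "," ++ PySem.Int.toStr t2) L by
              simp [changeArrInner, hgt]]
          exact ih _ ⟨x, hx, hxt⟩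
        · by_cases heq : t2 = t
          · rw [show changeArrInner t p2 key ((t2, p2) :: L) = changeArrInner t p2 key L by
                simp [changeArrInner, heq]]
            exact ih _ ⟨x, hx, hxt⟩
          · simp [changeArrInner, hgt, heq]
    · simp only [hp] at h
      rw [show changeArrInner t p key ((t2, p2) :: L) = changeArrInner t p key L by
            simp only [changeArrInner]
            rw [if_neg (fun hh => hp (Eq.symm hh))]]
      exact ih _ h

-- a strictly sorted list all of whose elements are ≥ t, containing t, is t :: (its part > t)
theorem pvSorted_head (xs : List Int) (t : Int) (hs : xs.Pairwise (· < ·))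
    (hmem : t ∈ xs) (hle : ∀ x ∈ xs, t ≤ x) :
    xs = t :: xs.filter (fun x => t < x) := by
  cases xs with
  | nil => simp at hmem
  | cons y ys =>
    have hall : ∀ z ∈ ys, y < z := fun z hz => (List.pairwise_cons.mp hs).1 z hz
    have hty : t = y := by
      rcases List.mem_cons.mp hmem with h | h
      · exact h
      · exact absurd (hall t h) (by have := hle y (by simp); omega)
    subst hty
    have : ys.filter (fun x => t < x) = ys :=
      List.filter_eq_self.mpr (fun z hz => by simp [hall z hz])
    simp [this]

-- the optional (key, value) pair A's outer loop body would insert for entry q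
def pvHA (arr : List (List Int)) (q : Int × List Int) : Option (String × String) :=
  (changeArrInner q.1 q.2 (PySem.Int.toStr q.1) (PySem.List.enumerate arr 0)).map
    (fun key => (key, PySem.Str.join "," (q.2.map (fun p => PySem.Int.toStr p))))

-- A's fold of conditional inserts = fold of inserts over the filterMap
theorem pvStep_fold (arr : List (List Int)) (L : List (Int × List Int))
    (d : PySem.Dict String String) :
    L.foldl (changeArrStep arr) d
      = (L.filterMap (pvHA arr)).foldl (fun d kv => d.insert kv.1 kv.2) d := by
  induction L generalizing d with
  | nil => rfl
  | cons a L ih =>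
    cases h : changeArrInner a.1 a.2 (PySem.Int.toStr a.1) (PySem.List.enumerate arr 0) <;>
      simp [changeArrStep, pvHA, h, ih]

-- dropping the 'none on proc = p' branch = filtering out proc = p first
theorem pvFilterMap_guard {β : Type} (L : List (Int × List Int)) (p : List Int)
    (h : Int × List Int → Option β) :
    L.filterMap (fun q => if q.2 = p then none else h q)
      = (L.filter (fun q => ¬ (q.2 = p))).filterMap h := by
  induction L with
  | nil => rfl
  | cons a L ih =>
    by_cases ha : a.2 = p <;> simp [List.filterMap_cons, ha, ih]

-- the first-occurrence filterMap over a strictly tid-sorted list is the canonical grouping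
theorem pvMain_aux {β : Type} (g : List Int × List Int → β) :
    ∀ (n : Nat) (L : List (Int × List Int)), L.length ≤ n →
    L.Pairwise (fun a b => a.1 < b.1) →
    L.filterMap (fun q => if ∀ x ∈ pvF q.2 L, q.1 ≤ x then some (g (q.2, pvF q.2 L)) else none)
      = (pvCanon L).map g := by
  intro n
  induction n with
  | zero =>
    intro L hlen _
    have hL : L = [] := List.eq_nil_of_length_eq_zero (Nat.le_zero.mp hlen)
    subst hL
    simp [pvCanon]
  | succ n ih =>
    intro L hlen hpw
    match L with
    | [] => simp [pvCanon]
    | (t, p) :: L' =>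
      obtain ⟨hlt, hpw'⟩ := List.pairwise_cons.mp hpw
      have hFlt : ∀ (r : List Int) (x : Int), x ∈ pvF r L' → t < x := by
        intro r x hx
        simp only [pvF, List.mem_map, List.mem_filter] at hx
        obtain ⟨q, ⟨hqL, _⟩, hq1⟩ := hx
        rw [← hq1]
        exact hlt q hqL
      rw [List.filterMap_cons]
      have hcond : ∀ x ∈ pvF (t, p).2 ((t, p) :: L'), (t, p).1 ≤ x := by
        intro x hx
        rw [pvF_cons, if_pos rfl] at hx
        rcases List.mem_cons.mp hx with hx1 | hx1
        · omega
        · exact le_of_lt (hFlt p x hx1)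
      rw [if_pos hcond]
      have hhead : pvF (t, p).2 ((t, p) :: L') = t :: pvF p L' := by
        rw [pvF_cons]; simp
      have htail : L'.filterMap (fun q =>
            if ∀ x ∈ pvF q.2 ((t, p) :: L'), q.1 ≤ x
            then some (g (q.2, pvF q.2 ((t, p) :: L'))) else none)
          = (pvCanon (L'.filter (fun q => ¬ (q.2 = p)))).map g := by
        rw [List.filterMap_congr (g := fun q => if q.2 = p then none else
              (if ∀ x ∈ pvF q.2 L', q.1 ≤ x then some (g (q.2, pvF q.2 L')) else none))
            (fun q hq => by
              beta_reduce
              by_cases hqp : q.2 = p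
              · rw [if_pos hqp, if_neg]
                intro hall
                have ht := hall t (by rw [hqp, pvF_cons]; simp)
                exact absurd (hlt q hq) (by omega)
              · rw [if_neg hqp, pvF_cons, if_neg (fun hh => hqp (Eq.symm hh))])]
        rw [pvFilterMap_guard]
        rw [List.filterMap_congr (g := fun q =>
              if ∀ x ∈ pvF q.2 (L'.filter (fun r => ¬ (r.2 = p))), q.1 ≤ x
              then some (g (q.2, pvF q.2 (L'.filter (fun r => ¬ (r.2 = p))))) else none)
            (fun q hq => by
              beta_reduce
              have hqp : ¬ q.2 = p := by
                have := (List.mem_filter.mp hq).2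
                simpa using this
              rw [pvF_filter_ne q.2 p L' hqp])]
        exact ih _ (le_trans (List.length_filter_le _ _) (Nat.le_of_succ_le_succ hlen))
          (List.Pairwise.filter _ hpw')
      rw [htail, hhead, pvCanon]
      rfl

theorem pvMain {β : Type} (g : List Int × List Int → β) (L : List (Int × List Int))
    (hL : L.Pairwise (fun a b => a.1 < b.1)) :
    L.filterMap (fun q => if ∀ x ∈ pvF q.2 L, q.1 ≤ x then some (g (q.2, pvF q.2 L)) else none)
      = (pvCanon L).map g := by
  exact pvMain_aux g L.length L le_rfl hL

-- B's grouping fold: items = existing groups extended, then new groups in canonical order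
theorem pvGroups_items (L : List (Int × List Int)) (d : PySem.Dict (List Int) (List Int))
    (hnd : d.keys.Nodup) :
    (L.foldl (fun d q => d.modify q.2 [] (fun ts => ts ++ [q.1])) d).items
      = d.items.map (fun kv => (kv.1, kv.2 ++ pvF kv.1 L))
        ++ pvCanon (L.filter (fun q => d.contains q.2 = false)) := by
  induction L generalizing d with
  | nil =>
    simp [pvF, pvCanon]
  | cons a L ih =>
    obtain ⟨t, p⟩ := a
    simp only [List.foldl_cons]
    have hmod : d.modify p [] (fun ts => ts ++ [t]) = d.insert p (d.getD p [] ++ [t]) := rfl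
    have hnd' : (d.insert p (d.getD p [] ++ [t])).keys.Nodup :=
      PySem.Dict.nodup_keys_insert d p _ hnd
    rw [hmod, ih _ hnd']
    by_cases hc : d.contains p = true
    · rw [PySem.Dict.items_insert_of_contains d _ hc, List.map_map]
      congr 1
      · apply List.map_congr_left
        intro kv hkv
        by_cases hkp : kv.1 = p
        · have hval : d.getD p [] = kv.2 := by
            rw [← hkp]
            exact PySem.Dict.getD_of_mem_items d (by simpa using hkv) hnd []
          simp [hkp, hval, pvF_cons]
        · simp only [Function.comp_def, pvF_cons]
          rw [if_neg (by simpa using hkp), if_neg (fun hh => hkp (Eq.symm hh))]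
      · have hfc : (((t, p) :: L).filter (fun q => d.contains q.2 = false))
            = L.filter (fun q => d.contains q.2 = false) := by
          rw [List.filter_cons]
          simp [hc]
        rw [hfc]
        congr 1
        apply List.filter_congr
        intro q _
        rw [PySem.Dict.contains_insert]
        by_cases hqp : q.2 = p
        · simp [hqp, hc]
        · simp [hqp]
    · have hc' : d.contains p = false := by simpa using hc
      rw [PySem.Dict.items_insert_of_not_contains d _ hc',
        PySem.Dict.getD_of_not_contains d [] hc', List.map_append]
      have hfc : (((t, p) :: L).filter (fun q => d.contains q.2 = false))
          = (t, p) :: L.filter (fun q => d.contains q.2 = false) := by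
        rw [List.filter_cons]
        simp [hc']
      rw [hfc, pvCanon]
      rw [List.append_assoc]
      congr 1
      · apply List.map_congr_left
        intro kv hkv
        have hkp : ¬ kv.1 = p := by
          intro hh
          exact absurd ((PySem.Dict.contains_iff_mem_keys d p).mpr
            (hh ▸ PySem.Dict.mem_keys_of_mem_items d hkv)) (by simp [hc'])
        rw [pvF_cons, if_neg (fun hh => hkp (Eq.symm hh))]
      · simp only [List.map_cons, List.map_nil, List.singleton_append]
        have hF1 : pvF p (L.filter (fun q => d.contains q.2 = false)) = pvF p L :=
          pvF_filter (c := fun q => d.contains q.2 = false)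
            (h := fun r hr => by beta_reduce; rw [hr]; simp [hc']) p L
        have hF2 : (L.filter (fun q => d.contains q.2 = false)).filter
              (fun q => ¬ (q.2 = p))
            = L.filter (fun q => (d.insert p (d.getD p [] ++ [t])).contains q.2 = false) := by
          rw [List.filter_filter]
          apply List.filter_congr
          intro q _
          rw [PySem.Dict.contains_insert]
          by_cases hqp : q.2 = p
          · simp [hqp]
          · simp [hqp]
        rw [hF1, hF2]
        simp [PySem.Dict.getD_of_not_contains d [] hc']

-- ===== VERDICT (by name: the statement is the Claim_ definition above) =====
theorem change_arr_spec : Claim_equal_change_arr := by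
  intro arr _
  unfold Spec_change_arr change_arr
  have hpw := PySem.List.pairwise_lt_enumerate arr 0
  rw [pvStep_fold]
  -- each entry contributes iff it is the first occurrence of its proc value
  rw [List.filterMap_congr
      (g := fun q : Int × List Int =>
        if ∀ x ∈ pvF q.2 (PySem.List.enumerate arr 0), q.1 ≤ x
        then some (pvG (q.2, pvF q.2 (PySem.List.enumerate arr 0))) else none)
      (fun q hq => by
        obtain ⟨t, p⟩ := q
        simp only [pvHA]
        have hsorted : (pvF p (PySem.List.enumerate arr 0)).Pairwise (· < ·) :=
          (hpw.filter _).map _ (fun a b h => h)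
        have hmem : t ∈ pvF p (PySem.List.enumerate arr 0) := by
          simp only [pvF, List.mem_map, List.mem_filter]
          exact ⟨(t, p), ⟨hq, by simp⟩, rfl⟩
        by_cases hc : ∀ x ∈ pvF p (PySem.List.enumerate arr 0), t ≤ x
        · rw [pvInner_some _ t p _ hc, if_pos hc]
          have hhd := pvSorted_head (pvF p (PySem.List.enumerate arr 0)) t hsorted hmem hc
          simp only [Option.map_some, pvG, pvKey_fold]
          conv_rhs => rw [hhd]
          simp
        · have hex : ∃ x ∈ pvF p (PySem.List.enumerate arr 0), x < t := by
            push Not at hc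
            obtain ⟨x, hx, h2⟩ := hc
            exact ⟨x, hx, by omega⟩
          rw [pvInner_none _ t p _ hex, if_neg hc]
          rfl)]
  rw [pvMain pvG (PySem.List.enumerate arr 0) hpw]
  -- B's grouping dict is exactly the canonical grouping
  have hgroups : ((PySem.List.enumerate arr 0).foldl
        (fun d q => d.modify q.2 [] (fun ts => ts ++ [q.1]))
        (PySem.Dict.empty : PySem.Dict (List Int) (List Int))).items
      = pvCanon (PySem.List.enumerate arr 0) := by
    rw [pvGroups_items _ _ (by rw [PySem.Dict.keys_empty]; exact List.nodup_nil)]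
    have hf : ((PySem.List.enumerate arr 0).filter
          (fun q => (PySem.Dict.empty : PySem.Dict (List Int) (List Int)).contains q.2 = false))
        = PySem.List.enumerate arr 0 :=
      List.filter_eq_self.mpr (fun q _ => by simp [PySem.Dict.contains_empty])
    rw [hf]
    simp [PySem.Dict.empty]
  rw [List.foldl_map, ← hgroups]
  rfl
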